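-- pv_equiv track=rewrite | github.com/yallalaraja/Python-DSA | Array Programs/Easy/is_subarray.py | is_subarray_deque
-- ===== SOURCE A (Python) =====
-- from collections import deque
--
-- def is_subarray_deque(arr, subarr):
--     dq = deque(arr[:len(subarr)])
--     for i in range(len(arr) - len(subarr) + 1):
--         if list(dq) == subarr:
--             return True
--         if i + len(subarr) < len(arr):
--             dq.popleft()
--             dq.append(arr[i + len(subarr)])
--     return False
-- ===== SOURCE B (Python) =====
-- def is_subarray_deque(arr, subarr):
--     n, m = len(arr), len(subarr)
--     if m == 0:
--         return True
--     if m > n: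
--         return False
--     BASE, MOD = 1000003, (1 << 61) - 1
--     pw = pow(BASE, m - 1, MOD)
--     target = 0
--     for x in subarr:
--         target = (target * BASE + x) % MOD
--     cur = 0
--     for x in arr[:m]:
--         cur = (cur * BASE + x) % MOD
--     for i in range(n - m + 1):
--         if cur == target and arr[i:i + m] == subarr:
--             return True
--         if i + m < n:
--             cur = ((cur - (arr[i] % MOD) * pw) * BASE + arr[i + m]) % MOD
--     return False
-- ===== Notes on version B (the rewrite author's own statement) =====
-- stated objective: alternative
-- what changed: Replaced the deque sliding window with an O(m) list comparison at every position by Rabin-Karp rolling-hash matching (O(1) hash update per position, full comparison only on a hash hit), verified so the result is exact.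
import Mathlib
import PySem

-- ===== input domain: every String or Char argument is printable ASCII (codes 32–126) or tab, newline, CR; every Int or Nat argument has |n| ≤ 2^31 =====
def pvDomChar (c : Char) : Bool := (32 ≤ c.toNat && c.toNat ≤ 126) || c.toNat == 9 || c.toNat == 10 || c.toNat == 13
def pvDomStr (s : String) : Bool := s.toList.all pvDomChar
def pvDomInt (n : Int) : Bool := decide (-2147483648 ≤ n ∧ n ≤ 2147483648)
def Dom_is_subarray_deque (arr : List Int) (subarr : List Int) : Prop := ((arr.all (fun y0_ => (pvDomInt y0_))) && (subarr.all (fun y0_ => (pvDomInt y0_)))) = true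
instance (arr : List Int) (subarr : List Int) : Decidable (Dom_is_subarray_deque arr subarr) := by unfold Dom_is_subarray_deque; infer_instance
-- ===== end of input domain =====

-- B replaces A's per-position deque/list comparison by a Rabin–Karp rolling hash
-- with verification on hash hits (exact result); objective: alternative algorithm.

-- ===== PORT A =====
-- the deque holds the current window; indices arr[i+m] are guarded in range, so getD is exact
def pvLoopA (arr : List Int) (subarr : List Int) : List Int → Nat → Nat → Bool
  | _, _, 0 => false
  | dq, i, k+1 =>
    if dq = subarr then true
    else if i + subarr.length < arr.length then
      pvLoopA arr subarr (dq.tail ++ [arr.getD (i + subarr.length) 0]) (i+1) k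
    else
      pvLoopA arr subarr dq (i+1) k

def is_subarray_deque (arr : List Int) (subarr : List Int) : Bool :=
  -- range(len(arr) - len(subarr) + 1) has max 0 (n - m + 1) iterations = n + 1 - m in ℕ
  pvLoopA arr subarr (arr.take subarr.length) 0 (arr.length + 1 - subarr.length)

-- ===== PORT B =====
-- (cur * BASE + x) % MOD accumulation of Source B's two hashing loops
def pvHash (l : List Int) : Int :=
  l.foldl (fun a x => (a * 1000003 + x) % 2305843009213693951) 0

-- all indices/slices use nonnegative in-range positions, so getD / drop-take are exact
def pvLoopB (arr : List Int) (subarr : List Int) (target : Int) (pw : Int) :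
    Int → Nat → Nat → Bool
  | _, _, 0 => false
  | cur, i, k+1 =>
    if cur = target ∧ (arr.drop i).take subarr.length = subarr then true
    else if i + subarr.length < arr.length then
      pvLoopB arr subarr target pw
        (((cur - (arr.getD i 0 % 2305843009213693951) * pw) * 1000003
            + arr.getD (i + subarr.length) 0) % 2305843009213693951)
        (i+1) k
    else
      pvLoopB arr subarr target pw cur (i+1) k

def is_subarray_deque_alt (arr : List Int) (subarr : List Int) : Bool :=
  if subarr.length = 0 then true
  else if arr.length < subarr.length then false
  else
    -- pw = pow(BASE, m-1, MOD)
    pvLoopB arr subarr (pvHash subarr) ((1000003 ^ (subarr.length - 1)) % 2305843009213693951)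
      (pvHash (arr.take subarr.length)) 0 (arr.length - subarr.length + 1)

-- ===== PRECONDITION & SPEC =====
def Spec_is_subarray_deque (arr : List Int) (subarr : List Int) (out : Bool) : Prop := out = is_subarray_deque_alt arr subarr
instance (arr : List Int) (subarr : List Int) (out : Bool) : Decidable (Spec_is_subarray_deque arr subarr out) := by unfold Spec_is_subarray_deque; infer_instance

-- ===== CLAIM (what is proved, stated in full; the proofs are below) =====
def Claim_equal_is_subarray_deque : Prop := ∀ (arr : List Int) (subarr : List Int), Dom_is_subarray_deque arr subarr → Spec_is_subarray_deque arr subarr (is_subarray_deque arr subarr)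


-- ===== LEMMAS AND PROOFS =====

-- the common specification: subarr occurs as the window of length m starting at j
def pvW (arr subarr : List Int) (j : Nat) : Prop := (arr.drop j).take subarr.length = subarr

lemma pv_window_cons (arr : List Int) (m i : Nat) (hm : 1 ≤ m) (hi : i < arr.length) :
    (arr.drop i).take m = arr.getD i 0 :: ((arr.drop i).take m).tail := by
  have hlen : (arr.drop i).length = arr.length - i := by simp
  have hne : arr.drop i ≠ [] := by
    intro h; rw [h] at hlen; simp at hlen; omega
  obtain ⟨x, xs, hx⟩ := List.exists_cons_of_ne_nil hne
  have hx0 : arr.getD i 0 = x := by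
    have h0 : (arr.drop i).getD 0 0 = x := by rw [hx]; rfl
    simpa [List.getD, List.getElem?_drop] using h0
  obtain ⟨m', rfl⟩ := Nat.exists_eq_add_of_le hm
  rw [hx, hx0]
  simp [List.take_succ_cons, Nat.add_comm]

lemma pv_window_step (arr : List Int) (m i : Nat) (hm : 1 ≤ m) (h : i + m < arr.length) :
    ((arr.drop i).take m).tail ++ [arr.getD (i + m) 0] = (arr.drop (i+1)).take m := by
  apply List.ext_getElem
  · simp; omega
  · intro j h1 h2
    simp only [List.length_append, List.length_tail, List.length_take, List.length_drop,
      List.length_cons] at h1 h2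
    by_cases hj : j < m - 1
    · rw [List.getElem_append_left (by simp; omega)]
      simp [List.getElem_tail, List.getElem_take, List.getElem_drop]
      congr 1; omega
    · have hj' : j = m - 1 := by omega
      rw [List.getElem_append_right (by simp; omega)]
      rw [List.getElem_singleton, List.getD_eq_getElem _ _ h]
      simp only [List.getElem_take, List.getElem_drop]
      congr 1; omega

-- the un-reduced polynomial accumulator
def pvP (a : Int) (l : List Int) : Int := l.foldl (fun a x => a * 1000003 + x) a

lemma pv_emod_self (a : Int) : (a % 2305843009213693951) ≡ a [ZMOD 2305843009213693951] :=
  Int.emod_emod_of_dvd a dvd_rfl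

lemma pvP_linear : ∀ (l : List Int) (a : Int), pvP a l = a * 1000003 ^ l.length + pvP 0 l := by
  intro l
  induction l with
  | nil => intro a; simp [pvP]
  | cons x xs ih =>
    intro a
    have h1 : pvP a (x :: xs) = pvP (a * 1000003 + x) xs := rfl
    have h2 : pvP 0 (x :: xs) = pvP (0 * 1000003 + x) xs := rfl
    rw [h1, h2, ih (a * 1000003 + x), ih (0 * 1000003 + x)]
    simp only [List.length_cons]
    ring

lemma pvHash_eq_P : ∀ (l : List Int) (a : Int),
    l.foldl (fun a x => (a * 1000003 + x) % 2305843009213693951) (a % 2305843009213693951)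
      = (pvP a l) % 2305843009213693951 := by
  intro l
  induction l with
  | nil => intro a; simp [pvP]
  | cons x xs ih =>
    intro a
    show xs.foldl _ ((a % 2305843009213693951 * 1000003 + x) % 2305843009213693951) = _
    have h : (a % 2305843009213693951 * 1000003 + x) % 2305843009213693951
        = (a * 1000003 + x) % 2305843009213693951 :=
      ((pv_emod_self a).mul_right 1000003).add_right x
    rw [h, ih (a * 1000003 + x)]
    rfl

lemma pvHash_P (l : List Int) : pvHash l = (pvP 0 l) % 2305843009213693951 := by
  have := pvHash_eq_P l 0
  simpa [pvHash] using this

-- rolling hash update is exact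
lemma pv_roll (x y : Int) (w : List Int) :
    pvHash (w ++ [y]) =
      ((pvHash (x :: w) - (x % 2305843009213693951) * ((1000003 ^ w.length) % 2305843009213693951))
          * 1000003 + y) % 2305843009213693951 := by
  have hP : pvP 0 (w ++ [y]) = (pvP 0 (x :: w) - x * 1000003 ^ w.length) * 1000003 + y := by
    have h1 : pvP 0 (x :: w) = x * 1000003 ^ w.length + pvP 0 w := by
      have h0 : pvP 0 (x :: w) = pvP (0 * 1000003 + x) w := rfl
      rw [h0, pvP_linear w (0 * 1000003 + x)]; ring
    have h2 : pvP 0 (w ++ [y]) = (pvP 0 w) * 1000003 + y := by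
      simp [pvP, List.foldl_append]
    rw [h2, h1]; ring
  rw [pvHash_P, pvHash_P, hP]
  exact ((((pv_emod_self (pvP 0 (x :: w))).sub
    ((pv_emod_self x).mul (pv_emod_self (1000003 ^ w.length)))).mul_right 1000003).add_right y).symm

-- A's loop finds exactly the windows in the next k positions
lemma pv_loopA_iff (arr sub : List Int) (hm : sub.length ≤ arr.length) :
    ∀ (k i : Nat), i + k ≤ arr.length - sub.length + 1 →
      (pvLoopA arr sub ((arr.drop i).take sub.length) i k = true ↔ ∃ t < k, pvW arr sub (i+t)) := by
  intro k
  induction k with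
  | zero => intro i _; simp [pvLoopA]
  | succ k ih =>
    intro i hik
    rw [pvLoopA]
    by_cases hw : (arr.drop i).take sub.length = sub
    · rw [if_pos hw]
      constructor
      · intro _; exact ⟨0, by omega, by simpa [pvW] using hw⟩
      · intro _; rfl
    · rw [if_neg hw]
      have hm1 : 1 ≤ sub.length := by
        rcases Nat.eq_zero_or_pos sub.length with h0 | h1
        · exact absurd (by rw [List.length_eq_zero_iff.mp h0]; simp) hw
        · exact h1
      by_cases hb : i + sub.length < arr.length
      · rw [if_pos hb, pv_window_step arr sub.length i hm1 hb, ih (i+1) (by omega)]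
        constructor
        · rintro ⟨t, ht, hW⟩
          exact ⟨t+1, by omega, by rwa [show i+(t+1) = i+1+t by omega]⟩
        · rintro ⟨t, ht, hW⟩
          match t with
          | 0 => exact absurd (by simpa [pvW] using hW) hw
          | t+1 => exact ⟨t, by omega, by rwa [show i+1+t = i+(t+1) by omega]⟩
      · rw [if_neg hb]
        have hk0 : k = 0 := by omega
        subst hk0
        simp only [pvLoopA, Bool.false_eq_true, false_iff]
        rintro ⟨t, ht, hW⟩
        have ht0 : t = 0 := by omega
        subst ht0
        exact hw (by simpa [pvW] using hW)

-- B's loop finds exactly the windows in the next k positions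
lemma pv_loopB_iff (arr sub : List Int) (hm1 : 1 ≤ sub.length) (hm : sub.length ≤ arr.length) :
    ∀ (k i : Nat), i + k ≤ arr.length - sub.length + 1 →
      (pvLoopB arr sub (pvHash sub) ((1000003 ^ (sub.length - 1)) % 2305843009213693951)
          (pvHash ((arr.drop i).take sub.length)) i k = true ↔ ∃ t < k, pvW arr sub (i+t)) := by
  intro k
  induction k with
  | zero => intro i _; simp [pvLoopB]
  | succ k ih =>
    intro i hik
    rw [pvLoopB]
    by_cases hw : (arr.drop i).take sub.length = sub
    · rw [if_pos ⟨by rw [hw], hw⟩]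
      constructor
      · intro _; exact ⟨0, by omega, by simpa [pvW] using hw⟩
      · intro _; rfl
    · rw [if_neg (by intro h; exact hw h.2)]
      by_cases hb : i + sub.length < arr.length
      · rw [if_pos hb]
        have hi : i < arr.length := by omega
        have hcons := pv_window_cons arr sub.length i hm1 hi
        have htail : ((arr.drop i).take sub.length).tail.length = sub.length - 1 := by
          simp only [List.length_tail, List.length_take, List.length_drop]
          omega
        have hroll := pv_roll (arr.getD i 0) (arr.getD (i + sub.length) 0)
          ((arr.drop i).take sub.length).tail
        rw [htail, ← hcons, pv_window_step arr sub.length i hm1 hb] at hroll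
        rw [← hroll, ih (i+1) (by omega)]
        constructor
        · rintro ⟨t, ht, hW⟩
          exact ⟨t+1, by omega, by rwa [show i+(t+1) = i+1+t by omega]⟩
        · rintro ⟨t, ht, hW⟩
          match t with
          | 0 => exact absurd (by simpa [pvW] using hW) hw
          | t+1 => exact ⟨t, by omega, by rwa [show i+1+t = i+(t+1) by omega]⟩
      · rw [if_neg hb]
        have hk0 : k = 0 := by omega
        subst hk0
        simp only [pvLoopB, Bool.false_eq_true, false_iff]
        rintro ⟨t, ht, hW⟩
        have ht0 : t = 0 := by omega
        subst ht0
        exact hw (by simpa [pvW] using hW)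


-- ===== VERDICT (by name: the statement is the Claim_ definition above) =====
theorem is_subarray_deque_spec : Claim_equal_is_subarray_deque := by
  intro arr sub _
  unfold Spec_is_subarray_deque is_subarray_deque is_subarray_deque_alt
  by_cases h0 : sub.length = 0
  · rcases List.length_eq_zero_iff.mp h0 with rfl
    simp only [List.length_nil]
    show pvLoopA arr [] (arr.take 0) 0 (arr.length + 1 - 0) = true
    have : arr.length + 1 - 0 = arr.length + 1 := by omega
    rw [this]
    simp [pvLoopA]
  · by_cases hn : arr.length < sub.length
    · rw [if_neg h0, if_pos hn]
      have : arr.length + 1 - sub.length = 0 := by omega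
      rw [this]
      rfl
    · have hn' := Nat.le_of_not_lt hn
      rw [if_neg h0, if_neg hn]
      have hA := pv_loopA_iff arr sub hn' (arr.length + 1 - sub.length) 0 (by omega)
      have hB := pv_loopB_iff arr sub (by omega) hn' (arr.length - sub.length + 1) 0 (by omega)
      simp only [List.drop_zero] at hA hB
      have hk : arr.length + 1 - sub.length = arr.length - sub.length + 1 := by omega
      rw [hk] at hA
      have h := hA.trans hB.symm
      cases hx : pvLoopA arr sub (arr.take sub.length) 0 (arr.length + 1 - sub.length) <;>
        cases hy : pvLoopB arr sub (pvHash sub)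
          ((1000003 ^ (sub.length - 1)) % 2305843009213693951)
          (pvHash (arr.take sub.length)) 0 (arr.length - sub.length + 1) <;>
        simp_all
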